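-- pv_equiv track=rewrite | github.com/8ly-dev/Serv | serv/routing/generation.py | find_best_matching_path
-- ===== SOURCE A (Python) =====
-- from typing import TYPE_CHECKING, Any
--
-- def find_best_matching_path(paths: list[str], kwargs: dict[str, Any]) -> str | None:
--     """Find the best matching path based on the provided kwargs.
--
--     This method tries to find a path where all required parameters are provided in kwargs.
--     It prioritizes:
--     1. Paths where all parameters are provided and the most parameters are used
--     2. The most recently added path (last in the list)
--
--     If no path can be fully satisfied, it returns None.
--
--     Args:
--         paths: List of path patterns to choose from
--         kwargs: Dictionary of available parameters
--
--     Returns: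
--         Best matching path pattern or None if no match
--
--     Examples:
--         >>> paths = ["/users/{id}", "/users/{id}/profile/{type}"]
--         >>> find_best_matching_path(paths, {"id": 123, "type": "public"})
--         "/users/{id}/profile/{type}"  # Uses more parameters
--
--         >>> find_best_matching_path(paths, {"id": 123})
--         "/users/{id}"  # Only one with all required parameters
--     """
--     valid_paths = []
--
--     for path in paths:
--         param_names = []
--         for part in path.split("/"):
--             if part.startswith("{") and part.endswith("}"):
--                 param_spec = part[1:-1]
--                 # Handle typed parameters like {user_id:int}
--                 if ":" in param_spec:
--                     param_name = param_spec.split(":")[0]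
--                 else:
--                     param_name = param_spec
--                 param_names.append(param_name)
--
--         # Check if all parameters for this path are provided
--         if all(param in kwargs for param in param_names):
--             # Score is based on how many parameters are used by this path
--             valid_paths.append((path, len(param_names)))
--
--     if not valid_paths:
--         return None
--
--     # Return the path with the most parameters (to use as many kwargs as possible)
--     valid_paths.sort(key=lambda x: x[1], reverse=True)
--     return valid_paths[0][0]
-- ===== SOURCE B (Python) =====
-- def _param_names(path):
--     names = []
--     for part in path.split("/"):
--         if part.startswith("{") and part.endswith("}"):
--             spec = part[1:-1]
--             names.append(spec.split(":")[0] if ":" in spec else spec)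
--     return names
--
--
-- def find_best_matching_path(paths, kwargs):
--     best_path, best_score = None, -1
--     for path in paths:
--         names = _param_names(path)
--         if all(n in kwargs for n in names) and len(names) > best_score:
--             best_path, best_score = path, len(names)
--     return best_path
-- ===== Notes on version B (the rewrite author's own statement) =====
-- stated objective: simpler
-- what changed: Replaces A's filter-into-a-list plus stable reverse sort-then-take-head with a single linear best-so-far scan, updating only on a strictly greater parameter count so the first path among max-score ties still wins.
import Mathlib
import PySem

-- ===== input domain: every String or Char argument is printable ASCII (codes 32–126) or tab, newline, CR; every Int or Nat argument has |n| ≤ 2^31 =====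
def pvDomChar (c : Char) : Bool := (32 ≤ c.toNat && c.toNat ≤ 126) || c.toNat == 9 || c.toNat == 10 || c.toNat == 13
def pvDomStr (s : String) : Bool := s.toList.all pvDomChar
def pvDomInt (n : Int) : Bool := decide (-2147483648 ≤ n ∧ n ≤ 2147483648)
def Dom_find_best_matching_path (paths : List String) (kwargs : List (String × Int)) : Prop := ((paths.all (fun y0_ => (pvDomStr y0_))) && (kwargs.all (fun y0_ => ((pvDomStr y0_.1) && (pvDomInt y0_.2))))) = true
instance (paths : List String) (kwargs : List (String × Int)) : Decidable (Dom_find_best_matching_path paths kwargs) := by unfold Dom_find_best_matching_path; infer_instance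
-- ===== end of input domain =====

-- B replaces A's filter-into-a-list plus stable reverse sort with a single linear best-so-far scan
-- (strict update keeps A's first-among-ties choice); same return value.

-- ===== PORT A =====
-- A: build valid_paths by a loop (append (path, len(param_names)) when all params are in kwargs),
-- then stable reverse sort by the count and return the first element.
def find_best_matching_path (paths : List String) (kwargs : List (String × Int)) : Option String :=
  let valid_paths : List (String × Int) :=
    paths.foldl (fun acc path =>
      let param_names : List String :=
        ((PySem.Str.split? path "/").getD []).foldl (fun names part =>
          if PySem.Str.startswith part "{" && PySem.Str.endswith part "}" then
            let param_spec := PySem.Str.slice part (some 1) (some (-1))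
            let param_name :=
              if PySem.Str.isIn ":" param_spec then
                ((PySem.Str.split? param_spec ":").getD []).headD ""
              else param_spec
            names ++ [param_name]
          else names) []
      if param_names.all (fun param => PySem.Dict.contains (PySem.Dict.mk kwargs) param) then
        acc ++ [(path, (param_names.length : Int))]
      else acc) []
  if valid_paths.isEmpty then none
  else
    match PySem.List.sorted valid_paths (fun x => x.2) true with
    | [] => none   -- unreachable: the sort of a nonempty list
    | v :: _ => some v.1

-- ===== PORT B =====
-- B's helper _param_names: parse the parameter names of one path pattern.
def pvParamNames (path : String) : List String :=
  ((PySem.Str.split? path "/").getD []).foldl (fun names part =>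
    if PySem.Str.startswith part "{" && PySem.Str.endswith part "}" then
      let spec := PySem.Str.slice part (some 1) (some (-1))
      names ++ [if PySem.Str.isIn ":" spec then ((PySem.Str.split? spec ":").getD []).headD "" else spec]
    else names) []

-- B: one pass, keeping best_path/best_score, updating only on a strictly greater score.
def find_best_matching_path_alt (paths : List String) (kwargs : List (String × Int)) : Option String :=
  (paths.foldl (fun (acc : Option String × Int) path =>
      let names := pvParamNames path
      if names.all (fun n => PySem.Dict.contains (PySem.Dict.mk kwargs) n) && decide (acc.2 < (names.length : Int)) then
        (some path, (names.length : Int))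
      else acc)
    (none, -1)).1

-- ===== PRECONDITION & SPEC =====
def Spec_find_best_matching_path (paths : List String) (kwargs : List (String × Int)) (out : Option String) : Prop := out = find_best_matching_path_alt paths kwargs
instance (paths : List String) (kwargs : List (String × Int)) (out : Option String) : Decidable (Spec_find_best_matching_path paths kwargs out) := by unfold Spec_find_best_matching_path; infer_instance

-- ===== CLAIM (what is proved, stated in full; the proofs are below) =====
def Claim_equal_find_best_matching_path : Prop := ∀ (paths : List String) (kwargs : List (String × Int)), Dom_find_best_matching_path paths kwargs → Spec_find_best_matching_path paths kwargs (find_best_matching_path paths kwargs)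

-- ===== LEMMAS AND PROOFS =====

-- proof-side abbreviations
def pvValid (kwargs : List (String × Int)) (p : String) : Bool :=
  (pvParamNames p).all (fun n => PySem.Dict.contains (PySem.Dict.mk kwargs) n)

def pvValids (kwargs : List (String × Int)) (paths : List String) : List (String × Int) :=
  (paths.filter (pvValid kwargs)).map (fun p => (p, ((pvParamNames p).length : Int)))

def pvMStep (b : Option (String × Int)) (x : String × Int) : Option (String × Int) :=
  match b with
  | none => some x
  | some m => if m.2 < x.2 then some x else some m

def pvBestOf (l : List (String × Int)) : Option (String × Int) := l.foldl pvMStep none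

def pvPairOf (o : Option (String × Int)) : Option String × Int :=
  match o with
  | none => (none, -1)
  | some r => (some r.1, r.2)

def pvBStep (kwargs : List (String × Int)) (acc : Option String × Int) (path : String) : Option String × Int :=
  if (pvParamNames path).all (fun n => PySem.Dict.contains (PySem.Dict.mk kwargs) n) && decide (acc.2 < ((pvParamNames path).length : Int)) then
    (some path, ((pvParamNames path).length : Int))
  else acc

-- the head of insertBy (reverse comparison) only looks at the old head
lemma pvHead_insertBy (x : String × Int) (l : List (String × Int)) :
    (PySem.List.insertBy (fun a b => decide (b.2 < a.2)) x l).head? =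
      match l.head? with
      | none => some x
      | some y => if y.2 < x.2 then some x else some y := by
  cases l with
  | nil => rfl
  | cons y ys =>
    simp only [PySem.List.insertBy, List.head?_cons]
    by_cases h : y.2 < x.2 <;> simp [h]

lemma pvHead_foldl_insertBy (l : List (String × Int)) (acc : List (String × Int)) :
    (l.foldl (fun a x => PySem.List.insertBy (fun a b => decide (b.2 < a.2)) x a) acc).head? =
      l.foldl pvMStep acc.head? := by
  induction l generalizing acc with
  | nil => rfl
  | cons x t ih =>
    simp only [List.foldl_cons]
    rw [ih, pvHead_insertBy]
    cases h : acc.head? <;> simp [pvMStep]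

-- the head of A's stable reverse sort is the first maximal-score pair
lemma pvSorted_head (l : List (String × Int)) :
    (PySem.List.sorted l (fun x => x.2) true).head? = pvBestOf l := by
  rw [PySem.List.sorted_rev_eq_foldl_insertBy]
  exact pvHead_foldl_insertBy l []

-- B's scan from a some-state folds pvMStep over the remaining valid pairs
lemma pvScan_some (kwargs : List (String × Int)) (t : List String) (m : String × Int) :
    t.foldl (pvBStep kwargs) (some m.1, m.2) =
      pvPairOf ((pvValids kwargs t).foldl pvMStep (some m)) := by
  induction t generalizing m with
  | nil => rfl
  | cons p t ih =>
    simp only [List.foldl_cons, pvValids, List.filter_cons]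
    by_cases hv : pvValid kwargs p = true
    · have hv' := hv
      unfold pvValid at hv'
      by_cases hlt : m.2 < ((pvParamNames p).length : Int)
      · have hstep : pvBStep kwargs (some m.1, m.2) p = (some p, ((pvParamNames p).length : Int)) := by
          unfold pvBStep
          rw [hv', decide_eq_true hlt]
          simp
        rw [hstep, ih (p, ((pvParamNames p).length : Int))]
        simp only [hv, if_true, List.map_cons, List.foldl_cons, pvMStep, if_pos hlt]
        rfl
      · have hstep : pvBStep kwargs (some m.1, m.2) p = (some m.1, m.2) := by
          unfold pvBStep
          rw [decide_eq_false hlt]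
          simp
        rw [hstep, ih m]
        simp only [hv, if_true, List.map_cons, List.foldl_cons, pvMStep, if_neg hlt]
        rfl
    · have hv' : ((pvParamNames p).all fun n => PySem.Dict.contains (PySem.Dict.mk kwargs) n) = false := by
        unfold pvValid at hv
        exact Bool.eq_false_iff.mpr hv
      have hstep : pvBStep kwargs (some m.1, m.2) p = (some m.1, m.2) := by
        unfold pvBStep
        rw [hv']
        simp
      rw [hstep, ih m]
      simp only [hv, if_false, Bool.false_eq_true]
      rfl

-- B's scan from the initial state computes pvBestOf of the valid pairs
lemma pvScan (kwargs : List (String × Int)) (paths : List String) :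
    paths.foldl (pvBStep kwargs) (none, -1) = pvPairOf (pvBestOf (pvValids kwargs paths)) := by
  induction paths with
  | nil => rfl
  | cons p t ih =>
    simp only [List.foldl_cons, pvBestOf, pvValids, List.filter_cons]
    by_cases hv : pvValid kwargs p = true
    · have hv' := hv
      unfold pvValid at hv'
      have hlt : (-1 : Int) < ((pvParamNames p).length : Int) := by omega
      have hstep : pvBStep kwargs (none, -1) p = (some p, ((pvParamNames p).length : Int)) := by
        unfold pvBStep
        rw [hv', decide_eq_true hlt]
        simp
      rw [hstep, pvScan_some kwargs t (p, ((pvParamNames p).length : Int))]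
      simp only [pvValids, hv, if_true, List.map_cons, List.foldl_cons, pvMStep]
    · have hv' : ((pvParamNames p).all fun n => PySem.Dict.contains (PySem.Dict.mk kwargs) n) = false := by
        unfold pvValid at hv
        exact Bool.eq_false_iff.mpr hv
      have hstep : pvBStep kwargs (none, -1) p = (none, -1) := by
        unfold pvBStep
        rw [hv']
        simp
      rw [hstep, ih]
      simp only [pvBestOf, pvValids, hv, if_false, Bool.false_eq_true]

-- A's list-building loop is filter-then-map
lemma pvValidLoop (kwargs : List (String × Int)) (paths : List String) :
    paths.foldl (fun acc path =>
      if (pvParamNames path).all (fun param => PySem.Dict.contains (PySem.Dict.mk kwargs) param) then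
        acc ++ [(path, ((pvParamNames path).length : Int))]
      else acc) [] = pvValids kwargs paths := by
  rw [PySem.List.foldl_append_if (fun path => (pvParamNames path).all (fun param => PySem.Dict.contains (PySem.Dict.mk kwargs) param)) (fun path => (path, ((pvParamNames path).length : Int)))]
  rfl

lemma pvB_eq (paths : List String) (kwargs : List (String × Int)) :
    find_best_matching_path_alt paths kwargs = (pvBestOf (pvValids kwargs paths)).map (fun r => r.1) := by
  have h : find_best_matching_path_alt paths kwargs = (paths.foldl (pvBStep kwargs) (none, -1)).1 := rfl
  rw [h, pvScan]
  cases pvBestOf (pvValids kwargs paths) <;> rfl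

lemma pvA_eq (paths : List String) (kwargs : List (String × Int)) :
    find_best_matching_path paths kwargs = (pvBestOf (pvValids kwargs paths)).map (fun r => r.1) := by
  have h : find_best_matching_path paths kwargs =
      (if (pvValids kwargs paths).isEmpty then none
       else
         match PySem.List.sorted (pvValids kwargs paths) (fun x => x.2) true with
         | [] => none
         | v :: _ => some v.1) := by
    show (let valid_paths : List (String × Int) :=
            paths.foldl (fun acc path =>
              if (pvParamNames path).all (fun param => PySem.Dict.contains (PySem.Dict.mk kwargs) param) then
                acc ++ [(path, ((pvParamNames path).length : Int))]
              else acc) [];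
          if valid_paths.isEmpty then none
          else
            match PySem.List.sorted valid_paths (fun x => x.2) true with
            | [] => none
            | v :: _ => some v.1) = _
    rw [show (paths.foldl (fun acc path =>
              if (pvParamNames path).all (fun param => PySem.Dict.contains (PySem.Dict.mk kwargs) param) then
                acc ++ [(path, ((pvParamNames path).length : Int))]
              else acc) [] : List (String × Int)) = pvValids kwargs paths from pvValidLoop kwargs paths]
  rw [h]
  by_cases he : (pvValids kwargs paths).isEmpty
  · have h' : pvValids kwargs paths = [] := List.isEmpty_iff.mp he
    simp [h', pvBestOf]
  · simp only [he]
    have hh := pvSorted_head (pvValids kwargs paths)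
    cases hs : PySem.List.sorted (pvValids kwargs paths) (fun x => x.2) true with
    | nil =>
      exact absurd ((PySem.List.sorted_eq_nil_iff _ _ _).mp hs)
        (fun h'' => he (List.isEmpty_iff.mpr h''))
    | cons v t =>
      rw [hs] at hh
      simp only [List.head?_cons] at hh
      simp [← hh]

-- ===== VERDICT (by name: the statement is the Claim_ definition above) =====
theorem find_best_matching_path_spec : Claim_equal_find_best_matching_path := by
  intro paths kwargs _
  unfold Spec_find_best_matching_path
  rw [pvA_eq, pvB_eq]
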